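-- pv_equiv track=rewrite | github.com/LenaAQA/codewars | lesson_3/02.py | stringy
-- ===== SOURCE A (Python) =====
-- def stringy(size):
--     result = ""
--     for i in range(size):
--         if i % 2 == 0:
--             result += str(1)
--         else:
--             result += str(0)
--     return result
-- ===== SOURCE B (Python) =====
-- def stringy(size):
--     return ("10" * (size // 2 + 1))[:size]
-- ===== Notes on version B (the rewrite author's own statement) =====
-- stated objective: faster
-- what changed: Replaces the indexed loop with a parity branch by one closed-form expression: repeat the two-character unit '10' enough times and slice to the requested length.
import Mathlib
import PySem

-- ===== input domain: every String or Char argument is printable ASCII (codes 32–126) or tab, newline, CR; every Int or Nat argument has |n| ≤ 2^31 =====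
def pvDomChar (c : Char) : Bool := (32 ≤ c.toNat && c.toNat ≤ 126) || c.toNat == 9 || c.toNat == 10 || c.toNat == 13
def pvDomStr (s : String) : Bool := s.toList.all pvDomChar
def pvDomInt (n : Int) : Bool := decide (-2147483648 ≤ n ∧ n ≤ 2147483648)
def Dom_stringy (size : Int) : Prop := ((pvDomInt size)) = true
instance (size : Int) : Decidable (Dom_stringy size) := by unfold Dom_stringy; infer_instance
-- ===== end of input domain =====

-- B replaces A's indexed loop and parity branch by the closed form ("10" * (size//2+1))[:size].

-- ===== PORT A =====
-- result is accumulated as a List Char (Python's += on str) and packed by String.mk at the end.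
def stringy (size : Int) : String :=
  String.mk ((PySem.List.pyRange 0 size 1).foldl
    (fun result i =>
      if PySem.Int.mod i 2 = 0 then result ++ (PySem.Int.toStr 1).toList
      else result ++ (PySem.Int.toStr 0).toList) [])

-- ===== PORT B =====
def stringy_alt (size : Int) : String :=
  String.mk (PySem.List.slice (PySem.List.pyRepeat "10".toList (PySem.Int.floordiv size 2 + 1))
    none (some size))

-- ===== PRECONDITION & SPEC =====
def Spec_stringy (size : Int) (out : String) : Prop := out = stringy_alt size
instance (size : Int) (out : String) : Decidable (Spec_stringy size out) := by unfold Spec_stringy; infer_instance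

-- ===== CLAIM (what is proved, stated in full; the proofs are below) =====
def Claim_equal_stringy : Prop := ∀ (size : Int), Dom_stringy size → Spec_stringy size (stringy size)

-- ===== LEMMAS AND PROOFS =====

-- reference alternating pattern of length n
def pvAlt (n : Nat) : List Char := (List.range n).map (fun k => if k % 2 = 0 then '1' else '0')

theorem pvAlt_succ (n : Nat) :
    pvAlt (n + 1) = pvAlt n ++ [if n % 2 = 0 then '1' else '0'] := by
  simp [pvAlt, List.range_succ]

theorem pvAlt_two_cons (n : Nat) : pvAlt (n + 2) = '1' :: '0' :: pvAlt n := by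
  simp only [pvAlt, List.range_succ_eq_map, List.map_cons, List.map_map, List.cons.injEq]
  refine ⟨by norm_num, by norm_num, ?_⟩
  apply List.map_congr_left
  intro k _
  simp only [Function.comp, Nat.succ_eq_add_one]
  simp only [show (k + 1 + 1) % 2 = k % 2 from by omega]

theorem pvAlt_take (n m : Nat) (h : n ≤ m) : (pvAlt m).take n = pvAlt n := by
  simp [pvAlt, ← List.map_take, List.take_range, Nat.min_eq_left h]

theorem pvRep_eq_alt (m : Nat) : (List.replicate m ['1','0']).flatten = pvAlt (2 * m) := by
  induction m with
  | zero => simp [pvAlt]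
  | succ k ih =>
      have : 2 * (k + 1) = 2 * k + 2 := by ring
      rw [this, pvAlt_two_cons, List.replicate_succ, List.flatten_cons, ih]
      rfl

theorem pvA_eq_alt (n : Nat) :
    (PySem.List.pyRange 0 (n : Int) 1).foldl
      (fun result i =>
        if PySem.Int.mod i 2 = 0 then result ++ (PySem.Int.toStr 1).toList
        else result ++ (PySem.Int.toStr 0).toList) [] = pvAlt n := by
  induction n with
  | zero => simp [PySem.List.pyRange_one_eq_nil, pvAlt]
  | succ k ih =>
      have hcast : ((k + 1 : Nat) : Int) = (k : Int) + 1 := by push_cast; ring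
      rw [hcast, PySem.List.pyRange_one_succ_right (by positivity), List.foldl_append, ih]
      have hmod : PySem.Int.mod (k : Int) 2 = 0 ↔ k % 2 = 0 := by
        rw [PySem.Int.mod_eq_emod_of_pos (by norm_num : (0:Int) < 2)]
        omega
      have h1 : (PySem.Int.toStr 1).toList = ['1'] := by decide
      have h0 : (PySem.Int.toStr 0).toList = ['0'] := by decide
      rw [pvAlt_succ]
      simp only [List.foldl_cons, List.foldl_nil]
      by_cases hk : k % 2 = 0
      · rw [if_pos (hmod.mpr hk), if_pos hk, h1]
      · rw [if_neg (fun h => hk (hmod.mp h)), if_neg hk, h0]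

theorem stringy_spec : Claim_equal_stringy := by
  intro size _
  unfold Spec_stringy stringy stringy_alt
  by_cases hs : size ≤ 0
  · rw [PySem.List.pyRange_one_eq_nil hs]
    rcases lt_or_eq_of_le hs with hlt | heq
    · have h0 : (size / 2 + 1).toNat = 0 := by omega
      rw [PySem.Int.floordiv_eq_ediv_of_pos (by norm_num : (0:Int) < 2)]
      simp [PySem.List.pyRepeat, h0, PySem.List.slice]
    · subst heq
      rw [PySem.List.slice_to _ (le_refl 0)]
      simp
  · push Not at hs
    obtain ⟨n, rfl⟩ : ∃ n : Nat, size = (n : Int) :=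
      ⟨size.toNat, (Int.toNat_of_nonneg (le_of_lt hs)).symm⟩
    rw [pvA_eq_alt n, PySem.List.slice_to_natCast]
    have hfd : PySem.Int.floordiv (n : Int) 2 + 1 = ((n / 2 + 1 : Nat) : Int) := by
      rw [PySem.Int.floordiv_eq_ediv_of_pos (by norm_num)]
      push_cast
      omega
    have h2 : "10".toList = ['1','0'] := by decide
    rw [hfd, h2]
    have htn : ((n / 2 + 1 : Nat) : Int).toNat = n / 2 + 1 := by omega
    rw [PySem.List.pyRepeat, htn, pvRep_eq_alt, pvAlt_take n (2 * (n / 2 + 1)) (by omega)]
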